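-- pv_equiv track=rewrite | github.com/taeyang121096/Coding_Test_Study | taeyang/Python/Kakao/2021_kakao_blind_recruitment/coding_5.py | maketime
-- ===== SOURCE A (Python) =====
-- def maketime(ls):
--     time = 0
--     for i in range(3):
--         if i == 0:
--             time += ls[i] * 60 * 60
--         elif i == 1:
--             time += ls[i] * 60
--         else:
--             time += ls[i]
--     return time
-- ===== SOURCE B (Python) =====
-- def maketime(ls):
--     # Horner evaluation in base 60: ((0*60+h)*60+m)*60+s, by recursion.
--     def go(i, acc):
--         if i == 3:
--             return acc
--         return go(i + 1, acc * 60 + ls[i])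
--     return go(0, 0)
-- ===== Notes on version B (the rewrite author's own statement) =====
-- stated objective: alternative
-- what changed: Replaced the range(3) loop that adds per-index weighted terms (chosen by if/elif/else) with a recursive Horner evaluation in base 60 (acc = acc*60 + ls[i]), which never multiplies by 3600 or 60 as weights.
import Mathlib
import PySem

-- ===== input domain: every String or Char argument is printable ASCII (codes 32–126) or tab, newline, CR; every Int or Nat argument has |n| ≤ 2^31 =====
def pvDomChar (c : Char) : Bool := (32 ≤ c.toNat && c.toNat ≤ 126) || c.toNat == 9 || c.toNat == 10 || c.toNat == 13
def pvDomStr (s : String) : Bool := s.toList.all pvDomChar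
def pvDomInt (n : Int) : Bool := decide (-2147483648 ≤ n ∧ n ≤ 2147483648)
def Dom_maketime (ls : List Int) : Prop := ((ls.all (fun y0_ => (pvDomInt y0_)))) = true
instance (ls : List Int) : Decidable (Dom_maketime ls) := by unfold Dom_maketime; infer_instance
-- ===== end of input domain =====

-- B replaces A's range(3) loop with per-index weighted if/elif/else terms by a
-- recursive Horner evaluation in base 60 (acc = acc*60 + ls[i]) (objective: alternative).


-- ===== PORT A =====
-- Loop over range(3); ls[i] ported with pyGet? (none = IndexError, excluded by Pre_;
-- getD 0 is only reached outside Pre_).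
def maketime (ls : List Int) : Int :=
  (PySem.List.pyRange 0 3 1).foldl
    (fun time i =>
      if i == 0 then time + (PySem.List.pyGet? ls i).getD 0 * 60 * 60
      else if i == 1 then time + (PySem.List.pyGet? ls i).getD 0 * 60
      else time + (PySem.List.pyGet? ls i).getD 0) 0

-- ===== PORT B =====
-- Recursive Horner helper go(i, acc): acc*60 + ls[i], stopping at i = 3.
def maketimeGo (ls : List Int) (i : Nat) (acc : Int) : Int :=
  if i == 3 then acc
  else if h : i < 3 then
    maketimeGo ls (i + 1) (acc * 60 + (PySem.List.pyGet? ls (i : Int)).getD 0)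
  else acc  -- unreachable: go is only called with i ≤ 3
termination_by 3 - i

def maketime_alt (ls : List Int) : Int := maketimeGo ls 0 0

-- ===== PRECONDITION & SPEC =====
-- Pre_ excludes lists with fewer than 3 elements, on which A raises IndexError.
def Pre_maketime (ls : List Int) : Prop := 3 ≤ ls.length
instance (ls : List Int) : Decidable (Pre_maketime ls) := by unfold Pre_maketime; infer_instance
def pvWitness_maketime : List Int := [1, 2, 3]

def Spec_maketime (ls : List Int) (out : Int) : Prop := out = maketime_alt ls
instance (ls : List Int) (out : Int) : Decidable (Spec_maketime ls out) := by unfold Spec_maketime; infer_instance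

-- ===== CLAIM (what is proved, stated in full; the proofs are below) =====
def Claim_equal_maketime : Prop := ∀ (ls : List Int), Dom_maketime ls → Pre_maketime ls → Spec_maketime ls (maketime ls)

-- ===== LEMMAS AND PROOFS =====

-- ===== VERDICT (by name: the statement is the Claim_ definition above) =====
theorem maketime_spec : Claim_equal_maketime := by
  intro ls _ hpre
  match ls, hpre with
  | a :: b :: c :: rest, _ =>
    show _ = _
    simp [maketime, maketime_alt, maketimeGo, PySem.List.pyRange,
      PySem.List.pyGet?, PySem.List.pyIdx?, List.range_succ]
    ring
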